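-- pv_equiv track=rewrite | github.com/gedearyarp/15-Puzzle-Python-Solver | puzzle.py | generateCostF
-- ===== SOURCE A (Python) =====
-- def generateCostF(start):
--     row_start = start//4
--     col_start = start%4
--     costs_f = []
--     for i in range(16):
--         row_i = i//4
--         col_i = i%4
--         costs_f.append(abs(row_start-row_i) + abs(col_start-col_i))
--     return costs_f
-- ===== SOURCE B (Python) =====
-- def generateCostF(start):
--     # Incremental scan: cost of the first cell, then each next cell's cost from the
--     # previous cell's cost via a +/-1 neighbour update (no abs per cell).
--     row_start = start // 4
--     col_start = start % 4
--     costs_f = [abs(row_start) + col_start]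
--     for i in range(15):
--         row_i = i // 4
--         col_i = i % 4
--         if col_i < 3:
--             delta = -1 if col_i < col_start else 1
--         else:
--             delta = (-1 if row_i < row_start else 1) + 2 * col_start - 3
--         costs_f.append(costs_f[-1] + delta)
--     return costs_f
-- ===== Notes on version B (the rewrite author's own statement) =====
-- stated objective: alternative
-- what changed: Replaces the per-cell closed-form abs computation with an incremental scan: only the first cost is computed directly, each later cost is derived from the previous cell's cost by a constant-time neighbour delta (+/-1 within a row, a row-wrap correction at column 3).
import Mathlib
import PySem

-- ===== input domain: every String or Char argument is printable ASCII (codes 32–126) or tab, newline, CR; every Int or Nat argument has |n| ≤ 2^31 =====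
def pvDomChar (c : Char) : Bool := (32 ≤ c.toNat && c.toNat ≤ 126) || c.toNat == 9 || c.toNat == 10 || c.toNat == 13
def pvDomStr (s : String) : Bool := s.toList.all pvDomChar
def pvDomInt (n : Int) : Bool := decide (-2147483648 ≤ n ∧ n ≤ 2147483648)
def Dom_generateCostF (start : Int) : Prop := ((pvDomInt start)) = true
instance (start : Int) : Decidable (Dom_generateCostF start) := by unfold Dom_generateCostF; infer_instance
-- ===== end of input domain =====

-- B: incremental scan — the first cell computed directly, later costs from the previous cell via constant deltas (alternative decomposition).


-- ===== PORT A =====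
-- Port of A: one loop over range(16), each step computing both abs differences.
def generateCostF (start : Int) : List Int :=
  let row_start := PySem.Int.floordiv start 4
  let col_start := PySem.Int.mod start 4
  (PySem.List.pyRange 0 16 1).foldl
    (fun costs_f i =>
      let row_i := PySem.Int.floordiv i 4
      let col_i := PySem.Int.mod i 4
      costs_f ++ [ |row_start - row_i| + |col_start - col_i| ]) []

-- ===== PORT B =====
-- Port of B: incremental scan — the first cell directly, each later cost from costs_f[-1] plus a delta.
def generateCostF_alt (start : Int) : List Int :=
  let row_start := PySem.Int.floordiv start 4
  let col_start := PySem.Int.mod start 4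
  (PySem.List.pyRange 0 15 1).foldl
    (fun costs_f i =>
      let row_i := PySem.Int.floordiv i 4
      let col_i := PySem.Int.mod i 4
      let delta := if col_i < 3 then (if col_i < col_start then (-1 : Int) else 1)
                   else (if row_i < row_start then (-1 : Int) else 1) + 2 * col_start - 3
      costs_f ++ [(PySem.List.pyGet? costs_f (-1)).getD 0 + delta])
    [ |row_start| + col_start ]

-- ===== PRECONDITION & SPEC =====
def Spec_generateCostF (start : Int) (out : List Int) : Prop := out = generateCostF_alt start
instance (start : Int) (out : List Int) : Decidable (Spec_generateCostF start out) := by unfold Spec_generateCostF; infer_instance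

-- ===== CLAIM (what is proved, stated in full; the proofs are below) =====
def Claim_equal_generateCostF : Prop := ∀ (start : Int), Dom_generateCostF start → Spec_generateCostF start (generateCostF start)

-- ===== LEMMAS AND PROOFS =====
-- The Manhattan cost of cell i from (rs, cs).
def pvCost (rs cs i : Int) : Int := |rs - PySem.Int.floordiv i 4| + |cs - PySem.Int.mod i 4|

-- The incremental delta B adds when moving from cell i to cell i+1.
def pvDelta (rs cs i : Int) : Int :=
  if PySem.Int.mod i 4 < 3 then (if PySem.Int.mod i 4 < cs then (-1 : Int) else 1)
  else (if PySem.Int.floordiv i 4 < rs then (-1 : Int) else 1) + 2 * cs - 3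

lemma pvStep (rs cs n : Int) (h0 : 0 ≤ cs) (h4 : cs < 4) :
    pvCost rs cs (n + 1) = pvCost rs cs n + pvDelta rs cs n := by
  unfold pvCost pvDelta
  simp only [PySem.Int.mod_eq_emod_of_pos (show (0:Int) < 4 by norm_num),
    PySem.Int.floordiv_eq_ediv_of_pos (show (0:Int) < 4 by norm_num)]
  split_ifs <;> simp only [Int.abs_eq_natAbs] <;> omega

lemma pvA_eq (start : Int) :
    generateCostF start =
      (PySem.List.pyRange 0 16 1).map
        (pvCost (PySem.Int.floordiv start 4) (PySem.Int.mod start 4)) := by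
  unfold generateCostF
  rw [PySem.List.foldl_append_singleton_eq_map]
  simp [pvCost]

lemma pvB_inv (rs cs : Int) (h0 : 0 ≤ cs) (h4 : cs < 4) :
    ∀ n : Nat, n ≤ 15 →
      (PySem.List.pyRange 0 (n : Int) 1).foldl
        (fun costs_f i =>
          costs_f ++ [(PySem.List.pyGet? costs_f (-1)).getD 0 + pvDelta rs cs i])
        [ |rs| + cs ]
      = (PySem.List.pyRange 0 ((n : Int) + 1) 1).map (pvCost rs cs) := by
  intro n
  induction n with
  | zero =>
    intro _
    rw [show ((0:Nat):Int) = 0 from rfl,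
        show PySem.List.pyRange 0 0 1 = [] from by decide,
        show (0:Int) + 1 = 1 from by norm_num,
        show PySem.List.pyRange 0 1 1 = [0] from by decide]
    simp [pvCost, abs_of_nonneg h0]
  | succ n ih =>
    intro hle
    have hn : (0 : Int) ≤ (n : Int) := Int.natCast_nonneg n
    push_cast
    rw [PySem.List.pyRange_one_succ_right hn, List.foldl_append, ih (by omega)]
    simp only [List.foldl_cons, List.foldl_nil]
    rw [PySem.List.pyRange_one_succ_right (by omega : (0:Int) ≤ (n:Int) + 1),
        PySem.List.pyRange_one_succ_right hn, List.map_append, List.map_append]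
    simp only [List.map_cons, List.map_nil]
    rw [PySem.List.pyGet?_neg_one_append_singleton]
    simp only [Option.getD_some, List.append_assoc, List.cons_append, List.nil_append]
    rw [← pvStep rs cs (n : Int) h0 h4]
    simp [List.map_append]

lemma pvMod_bounds (start : Int) :
    0 ≤ PySem.Int.mod start 4 ∧ PySem.Int.mod start 4 < 4 := by
  rw [PySem.Int.mod_eq_emod_of_pos (show (0:Int) < 4 by norm_num)]
  exact ⟨Int.emod_nonneg start (by norm_num), Int.emod_lt_of_pos start (by norm_num)⟩

-- ===== VERDICT (by name: the statement is the Claim_ definition above) =====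
theorem generateCostF_spec : Claim_equal_generateCostF := by
  intro start _
  unfold Spec_generateCostF
  obtain ⟨h0, h4⟩ := pvMod_bounds start
  rw [pvA_eq start]
  unfold generateCostF_alt
  have hB := pvB_inv (PySem.Int.floordiv start 4) (PySem.Int.mod start 4) h0 h4 15 (by norm_num)
  push_cast at hB
  exact hB.symm
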